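-- pv_equiv track=rewrite | github.com/maksimyss2000/Reinforsment_Learning_route_planing | State.py | allPossibleState
-- ===== SOURCE A (Python) =====
-- from itertools import combinations
--
-- def allPossibleState(wight, height, money):
--     q_table = {}
--     for x in range(wight):
--         for y in range(height):
--             for i in range(len(money) + 1):
--                 for j in combinations(money, i):
--                     q_table[x, y, j] = [0, 0, 0, 0]
--     return q_table
-- ===== SOURCE B (Python) =====
-- def allPossibleState(wight, height, money):
--     m = list(money)
--
--     def combs(lst, k):
--         if k == 0:
--             return [()]
--         if not lst:
--             return []
--         first, rest = lst[0], lst[1:]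
--         return [(first,) + t for t in combs(rest, k - 1)] + combs(rest, k)
--
--     subsets = []
--     for i in range(len(m) + 1):
--         subsets += combs(m, i)
--
--     return {(x, y, s): [0, 0, 0, 0]
--             for x in range(wight) for y in range(height) for s in subsets}
-- ===== Notes on version B (the rewrite author's own statement) =====
-- stated objective: alternative
-- what changed: B precomputes the full subset list once (a hand-rolled recursive combinations, appended size by size) and fills the table with a single flat dict comprehension over grid x subsets, instead of re-enumerating itertools.combinations size by size inside every grid cell.
import Mathlib
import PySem

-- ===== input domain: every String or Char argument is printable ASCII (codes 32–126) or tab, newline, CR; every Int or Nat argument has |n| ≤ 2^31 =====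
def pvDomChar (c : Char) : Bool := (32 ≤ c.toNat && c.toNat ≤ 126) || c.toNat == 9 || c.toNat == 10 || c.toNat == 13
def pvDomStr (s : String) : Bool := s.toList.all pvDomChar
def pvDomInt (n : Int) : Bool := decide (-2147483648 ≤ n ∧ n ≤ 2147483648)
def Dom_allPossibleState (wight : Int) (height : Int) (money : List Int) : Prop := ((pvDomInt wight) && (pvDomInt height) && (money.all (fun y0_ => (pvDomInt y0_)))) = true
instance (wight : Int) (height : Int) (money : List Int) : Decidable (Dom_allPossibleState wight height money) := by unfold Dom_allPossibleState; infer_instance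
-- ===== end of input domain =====

-- Alternative decomposition: B precomputes the subset list once (hand-rolled recursive combinations,
-- appended size by size) and fills the table in one flat pass over grid cells x subsets, instead of
-- re-enumerating itertools.combinations size by size inside every grid cell. Same asymptotic cost.

-- ===== PORT A =====
-- A's dict keys (x, y, j) with value [0,0,0,0]; items flattened to (x, y, j, value).
def allPossibleState (wight : Int) (height : Int) (money : List Int) : List (Int × Int × List Int × List Int) :=
  let q_table : PySem.Dict (Int × Int × List Int) (List Int) :=
    (PySem.List.pyRange 0 wight 1).foldl (fun d x =>
      (PySem.List.pyRange 0 height 1).foldl (fun d y =>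
        (PySem.List.pyRange 0 ((money.length : Int) + 1) 1).foldl (fun d i =>
          (PySem.List.combinations money i.toNat).foldl (fun d j =>
            d.insert (x, y, j) [0, 0, 0, 0]) d) d) d) PySem.Dict.empty
  q_table.items.map (fun p => (p.1.1, p.1.2.1, p.1.2.2, p.2))

-- ===== PORT B =====
-- hand-written recursive combinations from Source B
def pvCombs : List Int → Nat → List (List Int)
  | _, 0 => [[]]
  | [], _ + 1 => []
  | a :: rest, k + 1 => (pvCombs rest k).map (fun t => a :: t) ++ pvCombs rest (k + 1)

def allPossibleState_alt (wight : Int) (height : Int) (money : List Int) : List (Int × Int × List Int × List Int) :=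
  let m := money
  let subsets : List (List Int) :=
    (PySem.List.pyRange 0 ((m.length : Int) + 1) 1).foldl (fun acc i => acc ++ pvCombs m i.toNat) []
  let q : PySem.Dict (Int × Int × List Int) (List Int) :=
    (PySem.List.pyRange 0 wight 1).foldl (fun d x =>
      (PySem.List.pyRange 0 height 1).foldl (fun d y =>
        subsets.foldl (fun d s => d.insert (x, y, s) [0, 0, 0, 0]) d) d) PySem.Dict.empty
  q.items.map (fun p => (p.1.1, p.1.2.1, p.1.2.2, p.2))

-- ===== PRECONDITION & SPEC =====
def Spec_allPossibleState (wight : Int) (height : Int) (money : List Int) (out : List (Int × Int × List Int × List Int)) : Prop := out = allPossibleState_alt wight height money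
instance (wight : Int) (height : Int) (money : List Int) (out : List (Int × Int × List Int × List Int)) : Decidable (Spec_allPossibleState wight height money out) := by unfold Spec_allPossibleState; infer_instance

-- ===== CLAIM (what is proved, stated in full; the proofs are below) =====
def Claim_equal_allPossibleState : Prop := ∀ (wight : Int) (height : Int) (money : List Int), Dom_allPossibleState wight height money → Spec_allPossibleState wight height money (allPossibleState wight height money)

-- ===== LEMMAS AND PROOFS =====

-- B's hand-written recursion computes itertools.combinations
theorem pvCombs_eq (lst : List Int) (k : Nat) : pvCombs lst k = PySem.List.combinations lst k := by
  induction lst generalizing k with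
  | nil =>
    cases k <;> simp [pvCombs, PySem.List.combinations_zero, PySem.List.combinations_nil_succ]
  | cons a rest ih =>
    cases k <;>
      simp [pvCombs, ih, PySem.List.combinations_zero, PySem.List.combinations_cons_succ]

-- per-cell: A's size-indexed double loop equals one pass over B's precomputed subset list
theorem inner_eq (money : List Int) (x y : Int) (d : PySem.Dict (Int × Int × List Int) (List Int)) :
    (PySem.List.pyRange 0 ((money.length : Int) + 1) 1).foldl (fun d i =>
        (PySem.List.combinations money i.toNat).foldl (fun d j =>
          d.insert (x, y, j) [0, 0, 0, 0]) d) d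
    = ((PySem.List.pyRange 0 ((money.length : Int) + 1) 1).foldl
        (fun acc i => acc ++ pvCombs money i.toNat) []).foldl
        (fun d s => d.insert (x, y, s) [0, 0, 0, 0]) d := by
  rw [PySem.List.foldl_append_eq_flatMap]
  simp [List.flatMap_def, List.foldl_flatten, List.foldl_map, pvCombs_eq]

-- ===== VERDICT (by name: the statement is the Claim_ definition above) =====
theorem allPossibleState_spec : Claim_equal_allPossibleState := by
  intro wight height money _
  unfold Spec_allPossibleState allPossibleState allPossibleState_alt
  simp only [inner_eq]
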